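-- pv_equiv track=rewrite | github.com/mbjackson-capp/everybodycodes | song/q11.py | num_rounds_to_skip
-- ===== SOURCE A (Python) =====
-- from typing import List, Tuple
-- from math import ceil
--
-- def find_donors_and_recipients(flock: List[int]) -> Tuple[List[int], List[int]]:
--     """Assuming that serial bird transfer steps within a round continue to push
--     the same bird from one column to the next until that bird reaches a column
--     of smaller size than the one to its right (or failing that, the last column),
--     find the column indices from which a bird transfer must start (donors)
--     and the column indices at which a bird transfer must end (recipients)."""
--     donor_ixs = []
--     recipient_ixs = []
--     to_find_next = "donor"
--     for i, col in enumerate(flock):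
--         try:
--             if to_find_next == "donor" and col > flock[i + 1]:
--                 donor_ixs.append(i)
--                 to_find_next = "recipient"
--             elif to_find_next == "recipient" and col < flock[i + 1]:
--                 recipient_ixs.append(i)
--                 to_find_next = "donor"
--         except IndexError:  # very last index
--             if to_find_next == "recipient":
--                 recipient_ixs.append(i)
--     return donor_ixs, recipient_ixs
--
-- def num_rounds_to_skip(flock: List[int]) -> int:
--     gaps = []
--     donors, recipients = find_donors_and_recipients(flock)
--     # you have to do the logic both ways
--     for r in recipients:
--         if r - 1 in donors:
--             # receiving from neighbor, so cut gap in half to find balancing point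
--             gaps.append(ceil((flock[r - 1] - flock[r]) / 2))
--         else:
--             # this stops being a donor when its size strictly exceeds left neighbor's
--             gaps.append(flock[r - 1] - flock[r] + 1)  # the +1 might be wrong sometimes
--     for d in donors:
--         if (d - 1 >= 0) and flock[d - 1] == flock[d]:
--             gaps.append(1)
--         if d + 1 in recipients:
--             # donating to neighbor, so cut gap in half to find balancing point
--             gaps.append(ceil((flock[d] - flock[d + 1]) / 2))
--         else:
--             # this stops being a donor when its size diminishes to right neighbor's
--             gaps.append(flock[d] - flock[d + 1])
--     return 0 if not gaps else min(gaps)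
-- ===== SOURCE B (Python) =====
-- from math import ceil
--
--
-- def num_rounds_to_skip(flock):
--     # Staged, stateless pipeline: (1) list the strict comparison signs between
--     # adjacent columns, (2) pick run boundaries of the sign list (a sign whose
--     # predecessor sign differs) -- those are exactly the donors ('>' boundaries)
--     # and recipients ('<' boundaries), (3) zip them into pairs and take the min
--     # of each pair's gap candidates.
--     n = len(flock)
--     signs = [(i, flock[i] > flock[i + 1]) for i in range(n - 1) if flock[i] != flock[i + 1]]
--     prevs = [False] + [g for _, g in signs]
--     donors = [i for (i, g), p in zip(signs, prevs) if g and not p]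
--     recips = [i for (i, g), p in zip(signs, prevs) if (not g) and p]
--     if signs and signs[-1][1]:
--         recips.append(n - 1)
--     gaps = []
--     for d, r in zip(donors, recips):
--         if r == d + 1:
--             g = ceil((flock[d] - flock[r]) / 2)
--             gaps += [g, g]
--         else:
--             gaps += [flock[r - 1] - flock[r] + 1, flock[d] - flock[d + 1]]
--         if d >= 1 and flock[d - 1] == flock[d]:
--             gaps.append(1)
--     return min(gaps, default=0)
-- ===== Notes on version B (the rewrite author's own statement) =====
-- stated objective: alternative
-- what changed: Replaced A's stateful scan (build donor and recipient index lists, then re-scan each list with 'in'-membership tests against the other) by a staged, stateless pipeline: list the strict adjacent comparison signs, select run boundaries of that sign list by comparing each sign with its predecessor, zip the boundaries into donor/recipient pairs, and take one min over each pair's gap candidates.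
import Mathlib
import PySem

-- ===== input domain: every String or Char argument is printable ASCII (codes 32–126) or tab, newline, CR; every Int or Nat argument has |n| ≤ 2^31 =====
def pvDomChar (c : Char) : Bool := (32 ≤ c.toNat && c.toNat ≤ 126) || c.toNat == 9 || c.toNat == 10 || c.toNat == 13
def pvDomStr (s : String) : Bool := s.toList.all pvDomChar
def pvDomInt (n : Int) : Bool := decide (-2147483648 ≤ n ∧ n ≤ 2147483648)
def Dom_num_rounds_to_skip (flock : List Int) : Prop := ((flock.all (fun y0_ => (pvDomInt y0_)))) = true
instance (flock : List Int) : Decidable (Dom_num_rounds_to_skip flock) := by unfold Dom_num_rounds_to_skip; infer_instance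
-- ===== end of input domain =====

-- B replaces A's stateful scan (donor/recipient index lists re-scanned with membership
-- tests) by a staged, stateless pipeline: the list of strict adjacent comparison signs,
-- run-boundary selection on it, and a zip into donor/recipient pairs.

-- ===== PORT A =====
-- math.ceil(x/2) on an int x: ceiling division, exact on the magnitudes reachable under Dom
-- (where Python's float division is exact).
def pvCeilHalf (x : Int) : Int := -(PySem.Int.floordiv (-x) 2)

-- find_donors_and_recipients: fold over enumerate(flock); flock[i+1] via pyGet? (none is
-- exactly the caught IndexError at the very last index).
def pvFDR (flock : List Int) : List Int × List Int :=
  let st := (PySem.List.enumerate flock).foldl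
    (fun (s : List Int × List Int × String) (p : Int × Int) =>
      match PySem.List.pyGet? flock (p.1 + 1) with
      | some nxt =>
        if s.2.2 == "donor" && decide (p.2 > nxt) then (s.1 ++ [p.1], s.2.1, "recipient")
        else if s.2.2 == "recipient" && decide (p.2 < nxt) then (s.1, s.2.1 ++ [p.1], "donor")
        else s
      | none => if s.2.2 == "recipient" then (s.1, s.2.1 ++ [p.1], s.2.2) else s)
    ([], [], "donor")
  (st.1, st.2.1)

-- flock[r-1], flock[r], flock[d], flock[d+1]: the indices always satisfy 0 ≤ d < r ≤ len-1,
-- so Python never raises here and pyGetD's default 0 is never used.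
def num_rounds_to_skip (flock : List Int) : Int :=
  let dr := pvFDR flock
  let donors := dr.1
  let recipients := dr.2
  let gaps := recipients.foldl (fun gaps r =>
    if (r - 1) ∈ donors then
      gaps ++ [pvCeilHalf (PySem.List.pyGetD flock (r - 1) 0 - PySem.List.pyGetD flock r 0)]
    else
      gaps ++ [PySem.List.pyGetD flock (r - 1) 0 - PySem.List.pyGetD flock r 0 + 1]) []
  let gaps := donors.foldl (fun gaps d =>
    let gaps := if decide (d - 1 ≥ 0) && (PySem.List.pyGetD flock (d - 1) 0 == PySem.List.pyGetD flock d 0)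
      then gaps ++ [1] else gaps
    if (d + 1) ∈ recipients then
      gaps ++ [pvCeilHalf (PySem.List.pyGetD flock d 0 - PySem.List.pyGetD flock (d + 1) 0)]
    else
      gaps ++ [PySem.List.pyGetD flock d 0 - PySem.List.pyGetD flock (d + 1) 0]) gaps
  if gaps = [] then 0 else (PySem.List.min? gaps (fun y => y)).getD 0

-- ===== PORT B =====
-- Source B: signs/prevs/donors/recips comprehensions (filterMap over the range / the zip),
-- signs[-1][1] via getLast?, the gaps loop as a foldl, min(gaps, default=0) as minD.
def num_rounds_to_skip_alt (flock : List Int) : Int :=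
  let n : Int := (flock.length : Int)
  let signs := (PySem.List.pyRange 0 (n - 1) 1).filterMap (fun i =>
    if PySem.List.pyGetD flock i 0 ≠ PySem.List.pyGetD flock (i + 1) 0 then
      some (i, decide (PySem.List.pyGetD flock i 0 > PySem.List.pyGetD flock (i + 1) 0))
    else none)
  let prevs := false :: signs.map Prod.snd
  let donors := (signs.zip prevs).filterMap (fun x => if x.1.2 && !x.2 then some x.1.1 else none)
  let recips := (signs.zip prevs).filterMap (fun x => if !x.1.2 && x.2 then some x.1.1 else none)
  let recips := if (match signs.getLast? with | some s => s.2 | none => false)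
    then recips ++ [n - 1] else recips
  let gaps := (donors.zip recips).foldl (fun gaps p =>
    let gaps := if p.2 = p.1 + 1 then
        let g := pvCeilHalf (PySem.List.pyGetD flock p.1 0 - PySem.List.pyGetD flock p.2 0)
        gaps ++ [g, g]
      else
        gaps ++ [PySem.List.pyGetD flock (p.2 - 1) 0 - PySem.List.pyGetD flock p.2 0 + 1,
                 PySem.List.pyGetD flock p.1 0 - PySem.List.pyGetD flock (p.1 + 1) 0]
    if decide (p.1 ≥ 1) && (PySem.List.pyGetD flock (p.1 - 1) 0 == PySem.List.pyGetD flock p.1 0)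
      then gaps ++ [1] else gaps) []
  PySem.List.minD gaps (fun y => y) 0

-- ===== PRECONDITION & SPEC =====
def Spec_num_rounds_to_skip (flock : List Int) (out : Int) : Prop := out = num_rounds_to_skip_alt flock
instance (flock : List Int) (out : Int) : Decidable (Spec_num_rounds_to_skip flock out) := by unfold Spec_num_rounds_to_skip; infer_instance

-- ===== CLAIM (what is proved, stated in full; the proofs are below) =====
def Claim_equal_num_rounds_to_skip : Prop := ∀ (flock : List Int), Dom_num_rounds_to_skip flock → Spec_num_rounds_to_skip flock (num_rounds_to_skip flock)

-- ===== LEMMAS AND PROOFS =====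

-- Reference scan shared by the two proofs: the donor/recipient pairs of the suffix of the
-- flock starting at index i, given an optional pending donor.
def pvMP : List Int → Int → Option Int → List (Int × Int)
  | [], _, _ => []
  | [_], i, od => match od with | some d => [(d, i)] | none => []
  | x :: y :: rest, i, od =>
    match od with
    | none => if x > y then pvMP (y :: rest) (i + 1) (some i) else pvMP (y :: rest) (i + 1) none
    | some d => if x < y then (d, i) :: pvMP (y :: rest) (i + 1) none else pvMP (y :: rest) (i + 1) (some d)

-- The donors newly discovered by the scan (excluding a pending one).
def pvMF : List Int → Int → Option Int → List Int
  | [], _, _ => []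
  | [_], _, _ => []
  | x :: y :: rest, i, od =>
    match od with
    | none => if x > y then i :: pvMF (y :: rest) (i + 1) (some i) else pvMF (y :: rest) (i + 1) none
    | some d => if x < y then pvMF (y :: rest) (i + 1) none else pvMF (y :: rest) (i + 1) (some d)

-- A's to_find_next state as a string.
def pvTF : Option Int → String
  | none => "donor"
  | some _ => "recipient"

-- A's fold body, named so the invariant lemma can state it (definitionally the lambda of pvFDR).
def pvStepA (flock : List Int) (s : List Int × List Int × String) (p : Int × Int) :
    List Int × List Int × String :=
  match PySem.List.pyGet? flock (p.1 + 1) with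
  | some nxt =>
    if s.2.2 == "donor" && decide (p.2 > nxt) then (s.1 ++ [p.1], s.2.1, "recipient")
    else if s.2.2 == "recipient" && decide (p.2 < nxt) then (s.1, s.2.1 ++ [p.1], "donor")
    else s
  | none => if s.2.2 == "recipient" then (s.1, s.2.1 ++ [p.1], s.2.2) else s

theorem pvMP_fst_aux (l : List Int) : ∀ (i : Int) (od : Option Int),
    (pvMP l i od).map Prod.fst =
      (match od with | some d => if l = [] then [] else [d] | none => []) ++ pvMF l i od := by
  induction l with
  | nil => intro i od; cases od <;> simp [pvMP, pvMF]
  | cons x rest ih =>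
    intro i od
    cases rest with
    | nil => cases od <;> simp [pvMP, pvMF]
    | cons y rest' =>
      cases od with
      | none => by_cases h : x > y <;> simp [pvMP, pvMF, h, ih]
      | some d => by_cases h : x < y <;> simp [pvMP, pvMF, h, ih]

theorem pvMP_inv (l : List Int) : ∀ (i : Int) (od : Option Int),
    (∀ d, od = some d → d < i) →
    (∀ p ∈ pvMP l i od, (od.getD i) ≤ p.1 ∧ p.1 < p.2) ∧
      (pvMP l i od).Pairwise (fun p q : Int × Int => p.2 < q.1) := by
  induction l with
  | nil => intro i od h; simp [pvMP]
  | cons x rest ih =>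
    intro i od h
    cases rest with
    | nil =>
      cases od with
      | none => simp [pvMP]
      | some d => have := h d rfl; simp [pvMP]; omega
    | cons y rest' =>
      cases od with
      | none =>
        by_cases hxy : x > y
        · simp only [pvMP, if_pos hxy]
          have H := ih (i + 1) (some i) (by intro d hd; cases hd; omega)
          refine ⟨fun p hp => ?_, H.2⟩
          have := H.1 p hp
          simp only [Option.getD] at this ⊢
          omega
        · simp only [pvMP, if_neg hxy]
          have H := ih (i + 1) none (by intro d hd; cases hd)
          refine ⟨fun p hp => ?_, H.2⟩
          have := H.1 p hp
          simp only [Option.getD] at this ⊢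
          omega
      | some d =>
        have hd : d < i := h d rfl
        by_cases hxy : x < y
        · simp only [pvMP, if_pos hxy]
          have H := ih (i + 1) none (by intro d' hd'; cases hd')
          constructor
          · intro p hp
            rcases List.mem_cons.mp hp with hp | hp
            · subst hp; exact ⟨le_refl _, hd⟩
            · have := H.1 p hp
              simp only [Option.getD] at this ⊢
              omega
          · refine List.Pairwise.cons (fun q hq => ?_) H.2
            have := H.1 q hq
            simp only [Option.getD] at this
            omega
        · simp only [pvMP, if_neg hxy]
          simpa using ih (i + 1) (some d) (by intro d' hd'; cases hd'; omega)

theorem pvFDR_gen (flock : List Int) (suffix : List Int) : ∀ (i : Int) (D R : List Int) (od : Option Int),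
    0 ≤ i → flock.drop i.toNat = suffix → (od.isSome = true → suffix ≠ []) →
    ((PySem.List.enumerate suffix i).foldl (pvStepA flock) (D, R, pvTF od)).1 = D ++ pvMF suffix i od ∧
      ((PySem.List.enumerate suffix i).foldl (pvStepA flock) (D, R, pvTF od)).2.1 =
        R ++ (pvMP suffix i od).map Prod.snd := by
  induction suffix with
  | nil =>
    intro i D R od _ _ hne
    cases od with
    | none => simp [PySem.List.enumerate_nil, pvMF, pvMP]
    | some d => exact absurd rfl (hne rfl)
  | cons x rest ih =>
    intro i D R od hi hdrop hne
    have hnext : PySem.List.pyGet? flock (i + 1) = rest[0]? := by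
      rw [PySem.List.pyGet?_of_nonneg flock (by omega)]
      have h1 : (i + 1).toNat = i.toNat + 1 := by omega
      have h0 : (List.drop i.toNat flock)[1]? = flock[i.toNat + 1]? := List.getElem?_drop
      rw [hdrop] at h0
      rw [h1, ← h0]
      rfl
    have hdrop' : flock.drop (i + 1).toNat = rest := by
      have h1 : (i + 1).toNat = i.toNat + 1 := by omega
      have h2 := congrArg List.tail hdrop
      rw [List.tail_drop] at h2
      rw [h1, h2]
      rfl
    rw [PySem.List.enumerate_cons, List.foldl_cons]
    cases rest with
    | nil =>
      have hnone : PySem.List.pyGet? flock (i + 1) = none := by rw [hnext]; rfl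
      cases od with
      | none =>
        have hstep : pvStepA flock (D, R, pvTF none) (i, x) = (D, R, pvTF none) := by
          simp [pvStepA, hnone, pvTF]
        rw [hstep]
        simp [PySem.List.enumerate_nil, pvMF, pvMP]
      | some d =>
        have hstep : pvStepA flock (D, R, pvTF (some d)) (i, x) = (D, R ++ [i], pvTF (some d)) := by
          simp [pvStepA, hnone, pvTF]
        rw [hstep]
        simp [PySem.List.enumerate_nil, pvMF, pvMP]
    | cons y rest' =>
      have hsome : PySem.List.pyGet? flock (i + 1) = some y := by rw [hnext]; rfl
      cases od with
      | none =>
        by_cases hxy : x > y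
        · have hstep : pvStepA flock (D, R, pvTF none) (i, x) = (D ++ [i], R, pvTF (some i)) := by
            simp [pvStepA, hsome, pvTF, hxy]
          rw [hstep]
          have H := ih (i + 1) (D ++ [i]) R (some i) (by omega) hdrop' (by simp)
          refine ⟨?_, ?_⟩
          · rw [H.1]; simp [pvMF, hxy, List.append_assoc]
          · rw [H.2]; simp [pvMP, hxy]
        · have hstep : pvStepA flock (D, R, pvTF none) (i, x) = (D, R, pvTF none) := by
            simp [pvStepA, hsome, pvTF, hxy]
          rw [hstep]
          have H := ih (i + 1) D R none (by omega) hdrop' (by simp)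
          refine ⟨?_, ?_⟩
          · rw [H.1]; simp [pvMF, hxy]
          · rw [H.2]; simp [pvMP, hxy]
      | some d =>
        by_cases hxy : x < y
        · have hstep : pvStepA flock (D, R, pvTF (some d)) (i, x) = (D, R ++ [i], pvTF none) := by
            simp [pvStepA, hsome, pvTF, hxy]
          rw [hstep]
          have H := ih (i + 1) D (R ++ [i]) none (by omega) hdrop' (by simp)
          refine ⟨?_, ?_⟩
          · rw [H.1]; simp [pvMF, hxy]
          · rw [H.2]; simp [pvMP, hxy, List.append_assoc]
        · have hstep : pvStepA flock (D, R, pvTF (some d)) (i, x) = (D, R, pvTF (some d)) := by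
            simp [pvStepA, hsome, pvTF, hxy]
          rw [hstep]
          have H := ih (i + 1) D R (some d) (by omega) hdrop' (by simp)
          refine ⟨?_, ?_⟩
          · rw [H.1]; simp [pvMF, hxy]
          · rw [H.2]; simp [pvMP, hxy]

theorem pvFDR_eq (flock : List Int) :
    pvFDR flock = ((pvMP flock 0 none).map Prod.fst, (pvMP flock 0 none).map Prod.snd) := by
  have e : pvFDR flock =
      (((PySem.List.enumerate flock).foldl (pvStepA flock) ([], [], pvTF none)).1,
       ((PySem.List.enumerate flock).foldl (pvStepA flock) ([], [], pvTF none)).2.1) := rfl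
  have H := pvFDR_gen flock flock 0 [] [] none (le_refl 0) rfl (by intro h; simp at h)
  have hfst := pvMP_fst_aux flock 0 none
  simp only [List.nil_append] at H hfst
  rw [e, H.1, H.2, ← hfst]

-- ---- B side: the sign list of the suffix starting at index i, and the run-boundary
-- selections given the previous sign p (false = '<' or none, true = '>').
def pvS : List Int → Int → List (Int × Bool)
  | [], _ => []
  | [_], _ => []
  | x :: y :: rest, i => (if x ≠ y then [(i, decide (x > y))] else []) ++ pvS (y :: rest) (i + 1)

def pvDons : List (Int × Bool) → Bool → List Int
  | [], _ => []
  | s :: S, p => (if s.2 && !p then [s.1] else []) ++ pvDons S s.2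

def pvRecs : List (Int × Bool) → Bool → List Int
  | [], _ => []
  | s :: S, p => (if !s.2 && p then [s.1] else []) ++ pvRecs S s.2

def pvLastS : List (Int × Bool) → Bool → Bool
  | [], p => p
  | s :: S, _ => pvLastS S s.2

-- The recipients list after the possible final-column append.
def pvRFull (l : List Int) (i : Int) (p : Bool) : List Int :=
  pvRecs (pvS l i) p ++ (if pvLastS (pvS l i) p then [i + (l.length : Int) - 1] else [])

theorem pvSigns_eq (flock : List Int) (suffix : List Int) : ∀ (i : Int),
    0 ≤ i → flock.drop i.toNat = suffix →
    (PySem.List.pyRange i ((flock.length : Int) - 1) 1).filterMap (fun j =>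
      if PySem.List.pyGetD flock j 0 ≠ PySem.List.pyGetD flock (j + 1) 0 then
        some (j, decide (PySem.List.pyGetD flock j 0 > PySem.List.pyGetD flock (j + 1) 0))
      else none) = pvS suffix i := by
  induction suffix with
  | nil =>
    intro i hi hdrop
    have hile : flock.length ≤ i.toNat := by
      by_contra hgt
      have := congrArg List.length hdrop
      rw [List.length_drop] at this
      simp at this
      omega
    rw [PySem.List.pyRange_one_eq_nil (by omega)]
    rfl
  | cons x rest ih =>
    intro i hi hdrop
    have hlen : (x :: rest).length = flock.length - i.toNat := by
      rw [← hdrop, List.length_drop]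
    have hlt : i.toNat < flock.length := by simp at hlen; omega
    have hcast : i = ((i.toNat : Nat) : Int) := by omega
    have e0 : flock[i.toNat]? = some x := by
      have h0 : (List.drop i.toNat flock)[0]? = flock[i.toNat + 0]? := List.getElem?_drop
      rw [hdrop] at h0
      simpa using h0.symm
    have hgx : PySem.List.pyGetD flock i 0 = x := by
      rw [hcast, PySem.List.pyGetD_natCast, List.getD_eq_getElem?_getD, e0]; rfl
    cases rest with
    | nil =>
      have hl : (flock.length : Int) - 1 = i := by simp at hlen; omega
      rw [hl, PySem.List.pyRange_one_eq_nil (le_refl i)]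
      rfl
    | cons y rest' =>
      have hlt2 : i.toNat + 1 < flock.length := by simp at hlen; omega
      have e1 : flock[i.toNat + 1]? = some y := by
        have h0 : (List.drop i.toNat flock)[1]? = flock[i.toNat + 1]? := List.getElem?_drop
        rw [hdrop] at h0
        simpa using h0.symm
      have hgy : PySem.List.pyGetD flock (i + 1) 0 = y := by
        have hcast2 : i + 1 = (((i.toNat + 1 : Nat)) : Int) := by omega
        rw [hcast2, PySem.List.pyGetD_natCast, List.getD_eq_getElem?_getD, e1]; rfl
      have hdrop' : flock.drop (i + 1).toNat = y :: rest' := by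
        have h1 : (i + 1).toNat = i.toNat + 1 := by omega
        have h2 := congrArg List.tail hdrop
        rw [List.tail_drop] at h2
        rw [h1, h2]
        rfl
      have hrange : PySem.List.pyRange i ((flock.length : Int) - 1) 1 =
          i :: PySem.List.pyRange (i + 1) ((flock.length : Int) - 1) 1 := by
        apply PySem.List.pyRange_one_cons
        simp at hlen; omega
      rw [hrange, List.filterMap_cons, ih (i + 1) (by omega) hdrop']
      by_cases hne : x = y
      · simp [hgx, hgy, hne, pvS]
      · simp [pvS, hgx, hgy, hne]

theorem pvDons_eq (S : List (Int × Bool)) : ∀ (p : Bool),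
    (S.zip (p :: S.map Prod.snd)).filterMap (fun x => if x.1.2 && !x.2 then some x.1.1 else none) =
      pvDons S p := by
  induction S with
  | nil => intro p; rfl
  | cons s S' ih =>
    intro p
    simp only [List.map_cons, List.zip_cons_cons, List.filterMap_cons]
    by_cases h : (s.2 && !p) = true
    · rw [show (if ((s, p).1.2 && !(s, p).2) = true then some (s, p).1.1 else none) = some s.1 by simp [h]]
      rw [ih s.2]
      simp [pvDons, h]
    · rw [show (if ((s, p).1.2 && !(s, p).2) = true then some (s, p).1.1 else none) = (none : Option Int) by simp [h]]
      rw [ih s.2]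
      simp [pvDons, h]

theorem pvRecs_eq (S : List (Int × Bool)) : ∀ (p : Bool),
    (S.zip (p :: S.map Prod.snd)).filterMap (fun x => if !x.1.2 && x.2 then some x.1.1 else none) =
      pvRecs S p := by
  induction S with
  | nil => intro p; rfl
  | cons s S' ih =>
    intro p
    simp only [List.map_cons, List.zip_cons_cons, List.filterMap_cons]
    by_cases h : (!s.2 && p) = true
    · rw [show (if (!(s, p).1.2 && (s, p).2) = true then some (s, p).1.1 else none) = some s.1 by simp [h]]
      rw [ih s.2]
      simp [pvRecs, h]
    · rw [show (if (!(s, p).1.2 && (s, p).2) = true then some (s, p).1.1 else none) = (none : Option Int) by simp [h]]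
      rw [ih s.2]
      simp [pvRecs, h]

theorem pvLastS_eq (S : List (Int × Bool)) : ∀ (p : Bool),
    pvLastS S p = (match S.getLast? with | some s => s.2 | none => p) := by
  induction S with
  | nil => intro p; rfl
  | cons s S' ih =>
    intro p
    cases S' with
    | nil => simp [pvLastS]
    | cons t S'' => rw [List.getLast?_cons_cons]; exact ih s.2

-- The heart of the B-side proof: the run-boundary donors zipped with the run-boundary
-- recipients (plus the final-column append) are exactly the reference pairs pvMP.
theorem pvPairs_main (l : List Int) : ∀ (i : Int),
    ((pvDons (pvS l i) false).zip (pvRFull l i false) = pvMP l i none) ∧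
    (l ≠ [] → ∃ r rs, pvRFull l i true = r :: rs ∧
      ∀ d, pvMP l i (some d) = (d, r) :: (pvDons (pvS l i) true).zip rs) := by
  induction l with
  | nil => intro i; exact ⟨by simp [pvS, pvRFull, pvRecs, pvLastS, pvDons, pvMP], fun h => absurd rfl h⟩
  | cons x rest ih =>
    intro i
    cases rest with
    | nil =>
      refine ⟨by simp [pvS, pvRFull, pvRecs, pvLastS, pvDons, pvMP], fun _ => ⟨i, [], ?_, ?_⟩⟩
      · simp [pvS, pvRFull, pvRecs, pvLastS]
      · intro d; simp [pvS, pvMP, pvDons]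
    | cons y rest' =>
      have hlen : i + ((x :: y :: rest').length : Int) - 1 = (i + 1) + ((y :: rest').length : Int) - 1 := by
        simp; omega
      have IH := ih (i + 1)
      by_cases hne : x = y
      · have hS : pvS (x :: y :: rest') i = pvS (y :: rest') (i + 1) := by simp [pvS, hne]
        have hMPn : pvMP (x :: y :: rest') i none = pvMP (y :: rest') (i + 1) none := by
          subst hne; simp [pvMP]
        have hr1 : pvRFull (x :: y :: rest') i false = pvRFull (y :: rest') (i + 1) false := by
          simp only [pvRFull, hS, hlen]
        have hr2 : pvRFull (x :: y :: rest') i true = pvRFull (y :: rest') (i + 1) true := by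
          simp only [pvRFull, hS, hlen]
        refine ⟨by rw [hS, hr1, hMPn]; exact IH.1, fun _ => ?_⟩
        obtain ⟨r, rs, hrr, hmp⟩ := IH.2 (by simp)
        refine ⟨r, rs, by rw [hr2]; exact hrr, fun d => ?_⟩
        have hMPs : pvMP (x :: y :: rest') i (some d) = pvMP (y :: rest') (i + 1) (some d) := by
          subst hne; simp [pvMP]
        rw [hMPs, hS]; exact hmp d
      · by_cases hgt : x > y
        · have hS : pvS (x :: y :: rest') i = (i, true) :: pvS (y :: rest') (i + 1) := by
            simp [pvS, hne, hgt]
          have hLast : ∀ p, pvLastS (pvS (x :: y :: rest') i) p = pvLastS (pvS (y :: rest') (i + 1)) true := by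
            intro p; rw [hS]; rfl
          have hRecs : ∀ p, pvRecs (pvS (x :: y :: rest') i) p = pvRecs (pvS (y :: rest') (i + 1)) true := by
            intro p; rw [hS]; simp [pvRecs]
          have hRF : ∀ p, pvRFull (x :: y :: rest') i p = pvRFull (y :: rest') (i + 1) true := by
            intro p; simp only [pvRFull, hRecs, hLast, hlen]
          obtain ⟨r, rs, hrr, hmp⟩ := IH.2 (by simp)
          constructor
          · have hD : pvDons (pvS (x :: y :: rest') i) false =
                i :: pvDons (pvS (y :: rest') (i + 1)) true := by
              rw [hS]; simp [pvDons]
            rw [hD, hRF false, hrr, List.zip_cons_cons]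
            have : pvMP (x :: y :: rest') i none = pvMP (y :: rest') (i + 1) (some i) := by
              simp [pvMP, hgt]
            rw [this, hmp i]
          · intro _
            refine ⟨r, rs, by rw [hRF true]; exact hrr, fun d => ?_⟩
            have hD : pvDons (pvS (x :: y :: rest') i) true =
                pvDons (pvS (y :: rest') (i + 1)) true := by
              rw [hS]; simp [pvDons]
            have : pvMP (x :: y :: rest') i (some d) = pvMP (y :: rest') (i + 1) (some d) := by
              simp [pvMP]; omega
            rw [this, hD]; exact hmp d
        · have hlt : x < y := by omega
          have hS : pvS (x :: y :: rest') i = (i, false) :: pvS (y :: rest') (i + 1) := by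
            simp [pvS, hne]; omega
          have hLast : ∀ p, pvLastS (pvS (x :: y :: rest') i) p = pvLastS (pvS (y :: rest') (i + 1)) false := by
            intro p; rw [hS]; rfl
          have hD : ∀ p, pvDons (pvS (x :: y :: rest') i) p =
              pvDons (pvS (y :: rest') (i + 1)) false := by
            intro p; rw [hS]; simp [pvDons]
          constructor
          · have hRF : pvRFull (x :: y :: rest') i false = pvRFull (y :: rest') (i + 1) false := by
              simp only [pvRFull, hlen, hLast]
              rw [hS]; simp [pvRecs]
            have : pvMP (x :: y :: rest') i none = pvMP (y :: rest') (i + 1) none := by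
              simp [pvMP]; omega
            rw [this, hD false, hRF]; exact IH.1
          · intro _
            have hRF : pvRFull (x :: y :: rest') i true = i :: pvRFull (y :: rest') (i + 1) false := by
              simp only [pvRFull, hlen, hLast]
              rw [hS]; simp [pvRecs]
            refine ⟨i, pvRFull (y :: rest') (i + 1) false, hRF, fun d => ?_⟩
            have : pvMP (x :: y :: rest') i (some d) = (d, i) :: pvMP (y :: rest') (i + 1) none := by
              simp [pvMP, hlt]
            rw [this, hD true, ← IH.1]

-- Per-pair gap candidates of B's loop body.
def pvCands (flock : List Int) (d r : Int) : List Int :=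
  let out := if r = d + 1 then
      let g := pvCeilHalf (PySem.List.pyGetD flock d 0 - PySem.List.pyGetD flock r 0)
      [g, g]
    else
      [PySem.List.pyGetD flock (r - 1) 0 - PySem.List.pyGetD flock r 0 + 1,
       PySem.List.pyGetD flock d 0 - PySem.List.pyGetD flock (d + 1) 0]
  if decide (d ≥ 1) && (PySem.List.pyGetD flock (d - 1) 0 == PySem.List.pyGetD flock d 0)
    then out ++ [1] else out

-- The pieces of B's port, named (each is definitionally the corresponding let of the port).
def pvSignsP (flock : List Int) : List (Int × Bool) :=
  (PySem.List.pyRange 0 ((flock.length : Int) - 1) 1).filterMap (fun i =>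
    if PySem.List.pyGetD flock i 0 ≠ PySem.List.pyGetD flock (i + 1) 0 then
      some (i, decide (PySem.List.pyGetD flock i 0 > PySem.List.pyGetD flock (i + 1) 0))
    else none)

def pvDonorsP (flock : List Int) : List Int :=
  ((pvSignsP flock).zip (false :: (pvSignsP flock).map Prod.snd)).filterMap
    (fun x => if x.1.2 && !x.2 then some x.1.1 else none)

def pvRecipsP (flock : List Int) : List Int :=
  let recips := ((pvSignsP flock).zip (false :: (pvSignsP flock).map Prod.snd)).filterMap
    (fun x => if !x.1.2 && x.2 then some x.1.1 else none)
  if (match (pvSignsP flock).getLast? with | some s => s.2 | none => false)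
    then recips ++ [(flock.length : Int) - 1] else recips

theorem pvAlt_eq (flock : List Int) :
    num_rounds_to_skip_alt flock =
      PySem.List.minD ((pvMP flock 0 none).flatMap (fun p => pvCands flock p.1 p.2)) (fun y => y) 0 := by
  have e : num_rounds_to_skip_alt flock =
      PySem.List.minD (((pvDonorsP flock).zip (pvRecipsP flock)).foldl (fun gaps p =>
        let gaps := if p.2 = p.1 + 1 then
            let g := pvCeilHalf (PySem.List.pyGetD flock p.1 0 - PySem.List.pyGetD flock p.2 0)
            gaps ++ [g, g]
          else
            gaps ++ [PySem.List.pyGetD flock (p.2 - 1) 0 - PySem.List.pyGetD flock p.2 0 + 1,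
                     PySem.List.pyGetD flock p.1 0 - PySem.List.pyGetD flock (p.1 + 1) 0]
        if decide (p.1 ≥ 1) && (PySem.List.pyGetD flock (p.1 - 1) 0 == PySem.List.pyGetD flock p.1 0)
          then gaps ++ [1] else gaps) []) (fun y => y) 0 := rfl
  rw [e]
  have hS : pvSignsP flock = pvS flock 0 := pvSigns_eq flock flock 0 (le_refl 0) rfl
  have hD : pvDonorsP flock = pvDons (pvS flock 0) false := by
    unfold pvDonorsP; rw [hS]; exact pvDons_eq (pvS flock 0) false
  have hR : pvRecipsP flock = pvRFull flock 0 false := by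
    unfold pvRecipsP pvRFull
    rw [hS, pvRecs_eq, ← pvLastS_eq]
    by_cases h : pvLastS (pvS flock 0) false = true <;> simp [h]
  rw [hD, hR, (pvPairs_main flock 0).1]
  have hbody : (fun (gaps : List Int) (p : Int × Int) =>
      let gaps := if p.2 = p.1 + 1 then
          let g := pvCeilHalf (PySem.List.pyGetD flock p.1 0 - PySem.List.pyGetD flock p.2 0)
          gaps ++ [g, g]
        else
          gaps ++ [PySem.List.pyGetD flock (p.2 - 1) 0 - PySem.List.pyGetD flock p.2 0 + 1,
                   PySem.List.pyGetD flock p.1 0 - PySem.List.pyGetD flock (p.1 + 1) 0]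
      if decide (p.1 ≥ 1) && (PySem.List.pyGetD flock (p.1 - 1) 0 == PySem.List.pyGetD flock p.1 0)
        then gaps ++ [1] else gaps) =
      (fun gaps p => gaps ++ pvCands flock p.1 p.2) := by
    funext gaps p
    simp only [pvCands]
    split_ifs <;> simp
  rw [hbody, PySem.List.foldl_append_eq_flatMap]
  rfl

theorem pv_mem_fst_iff (P : List (Int × Int))
    (h1 : ∀ p ∈ P, p.1 < p.2) (h2 : P.Pairwise (fun p q : Int × Int => p.2 < q.1))
    (p : Int × Int) (hm : p ∈ P) : ((p.2 - 1) ∈ P.map Prod.fst ↔ p.1 = p.2 - 1) := by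
  induction P with
  | nil => cases hm
  | cons q P' ih =>
    rw [List.pairwise_cons] at h2
    rcases List.mem_cons.mp hm with rfl | hm'
    · simp only [List.map_cons, List.mem_cons]
      constructor
      · rintro (h | h)
        · omega
        · obtain ⟨q', hq', he⟩ := List.mem_map.mp h
          have := h2.1 q' hq'
          omega
      · intro h; exact Or.inl h.symm
    · have hq1 : q.1 < q.2 := h1 q (List.mem_cons_self ..)
      have hqp : q.2 < p.1 := h2.1 p hm'
      have hp12 : p.1 < p.2 := h1 p hm
      simp only [List.map_cons, List.mem_cons]
      rw [ih (fun r hr => h1 r (List.mem_cons_of_mem _ hr)) h2.2 hm']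
      constructor
      · rintro (h | h)
        · omega
        · exact h
      · intro h; exact Or.inr h

theorem pv_mem_snd_iff (P : List (Int × Int))
    (h1 : ∀ p ∈ P, p.1 < p.2) (h2 : P.Pairwise (fun p q : Int × Int => p.2 < q.1))
    (p : Int × Int) (hm : p ∈ P) : ((p.1 + 1) ∈ P.map Prod.snd ↔ p.2 = p.1 + 1) := by
  induction P with
  | nil => cases hm
  | cons q P' ih =>
    rw [List.pairwise_cons] at h2
    rcases List.mem_cons.mp hm with rfl | hm'
    · have hp12 : p.1 < p.2 := h1 p (List.mem_cons_self ..)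
      simp only [List.map_cons, List.mem_cons]
      constructor
      · rintro (h | h)
        · omega
        · obtain ⟨q', hq', he⟩ := List.mem_map.mp h
          have hq'1 := h1 q' (List.mem_cons_of_mem _ hq')
          have := h2.1 q' hq'
          omega
      · intro h; exact Or.inl h.symm
    · have hqp : q.2 < p.1 := h2.1 p hm'
      simp only [List.map_cons, List.mem_cons]
      rw [ih (fun r hr => h1 r (List.mem_cons_of_mem _ hr)) h2.2 hm']
      constructor
      · rintro (h | h)
        · omega
        · exact h
      · intro h; exact Or.inr h

theorem pv_map_map_congr {α β γ : Type} (P : List α) (f : α → β) (g1 : β → γ) (g2 : α → γ)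
    (h : ∀ p ∈ P, g1 (f p) = g2 p) : (P.map f).map g1 = P.map g2 := by
  induction P with
  | nil => rfl
  | cons p P' ih =>
    simp only [List.map_cons, h p (List.mem_cons_self ..)]
    rw [ih (fun q hq => h q (List.mem_cons_of_mem _ hq))]

theorem pv_flatMap_map_congr {α β γ : Type} (P : List α) (f : α → β) (g1 : β → List γ) (g2 : α → List γ)
    (h : ∀ p ∈ P, g1 (f p) = g2 p) : (P.map f).flatMap g1 = P.flatMap g2 := by
  induction P with
  | nil => rfl
  | cons p P' ih =>
    simp only [List.map_cons, List.flatMap_cons, h p (List.mem_cons_self ..)]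
    rw [ih (fun q hq => h q (List.mem_cons_of_mem _ hq))]

theorem pv_flatMap_perm_congr {α β : Type} (P : List α) (g1 g2 : α → List β)
    (h : ∀ p ∈ P, (g1 p).Perm (g2 p)) : (P.flatMap g1).Perm (P.flatMap g2) := by
  induction P with
  | nil => simp
  | cons p P' ih =>
    simp only [List.flatMap_cons]
    exact (h p (List.mem_cons_self ..)).append (ih (fun q hq => h q (List.mem_cons_of_mem _ hq)))

theorem pv_map_flatMap_perm {α β : Type} (P : List α) (f : α → β) (g : α → List β) :
    (P.map f ++ P.flatMap g).Perm (P.flatMap fun p => f p :: g p) := by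
  induction P with
  | nil => simp
  | cons p P' ih =>
    simp only [List.map_cons, List.flatMap_cons, List.cons_append]
    refine List.Perm.cons _ ?_
    exact (List.perm_append_comm_assoc (P'.map f) (g p) (P'.flatMap g)).trans (ih.append_left _)

theorem pv_perm_min (xs ys : List Int) (h : xs.Perm ys) :
    (if xs = [] then 0 else (PySem.List.min? xs (fun y => y)).getD 0) =
      PySem.List.minD ys (fun y => y) 0 := by
  by_cases hx : xs = []
  · subst hx
    have hy : ys = [] := h.symm.eq_nil
    subst hy
    have hn : PySem.List.min? ([] : List Int) (fun y => y) = none :=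
      (PySem.List.min?_eq_none_iff _ _).mpr rfl
    simp [PySem.List.minD, hn]
  · have hy : ys ≠ [] := fun he => hx ((he ▸ h).eq_nil)
    obtain ⟨m1, hm1⟩ : ∃ m, PySem.List.min? xs (fun y => y) = some m := by
      cases hmx : PySem.List.min? xs (fun y => y) with
      | none => exact absurd ((PySem.List.min?_eq_none_iff xs _).mp hmx) hx
      | some m => exact ⟨m, rfl⟩
    obtain ⟨m2, hm2⟩ : ∃ m, PySem.List.min? ys (fun y => y) = some m := by
      cases hmy : PySem.List.min? ys (fun y => y) with
      | none => exact absurd ((PySem.List.min?_eq_none_iff ys _).mp hmy) hy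
      | some m => exact ⟨m, rfl⟩
    have e : m1 = m2 := by
      have h12 : m2 ≤ m1 := PySem.List.min?_isMin hm2 m1 (h.mem_iff.mp (PySem.List.min?_mem hm1))
      have h21 : m1 ≤ m2 := PySem.List.min?_isMin hm1 m2 (h.mem_iff.mpr (PySem.List.min?_mem hm2))
      omega
    simp [PySem.List.minD, hx, hm1, hm2, e]

-- Per-pair gap candidate of A's recipient loop, with the membership test resolved.
def pvC1 (flock : List Int) (p : Int × Int) : Int :=
  if p.2 = p.1 + 1 then pvCeilHalf (PySem.List.pyGetD flock p.1 0 - PySem.List.pyGetD flock p.2 0)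
  else PySem.List.pyGetD flock (p.2 - 1) 0 - PySem.List.pyGetD flock p.2 0 + 1

-- Per-pair gap candidates of A's donor loop, with the membership test resolved.
def pvC2 (flock : List Int) (p : Int × Int) : List Int :=
  (if decide (p.1 - 1 ≥ 0) && (PySem.List.pyGetD flock (p.1 - 1) 0 == PySem.List.pyGetD flock p.1 0)
    then [1] else []) ++
  [if p.2 = p.1 + 1 then pvCeilHalf (PySem.List.pyGetD flock p.1 0 - PySem.List.pyGetD flock (p.1 + 1) 0)
   else PySem.List.pyGetD flock p.1 0 - PySem.List.pyGetD flock (p.1 + 1) 0]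

theorem pvA_eq (flock : List Int) :
    num_rounds_to_skip flock =
      (if ((pvMP flock 0 none).map (pvC1 flock) ++ (pvMP flock 0 none).flatMap (pvC2 flock)) = [] then 0
       else (PySem.List.min? ((pvMP flock 0 none).map (pvC1 flock) ++
               (pvMP flock 0 none).flatMap (pvC2 flock)) (fun y => y)).getD 0) := by
  have hinv := pvMP_inv flock 0 none (by intro d hd; cases hd)
  have h1 : ∀ p ∈ pvMP flock 0 none, p.1 < p.2 := fun p hp => (hinv.1 p hp).2
  have h2 := hinv.2
  have e1 : ∀ init : List Int,
      ((pvMP flock 0 none).map Prod.snd).foldl (fun gaps r =>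
        if (r - 1) ∈ (pvMP flock 0 none).map Prod.fst then
          gaps ++ [pvCeilHalf (PySem.List.pyGetD flock (r - 1) 0 - PySem.List.pyGetD flock r 0)]
        else
          gaps ++ [PySem.List.pyGetD flock (r - 1) 0 - PySem.List.pyGetD flock r 0 + 1]) init =
      init ++ (pvMP flock 0 none).map (pvC1 flock) := by
    intro init
    have hfun : (fun (gaps : List Int) (r : Int) =>
        if (r - 1) ∈ (pvMP flock 0 none).map Prod.fst then
          gaps ++ [pvCeilHalf (PySem.List.pyGetD flock (r - 1) 0 - PySem.List.pyGetD flock r 0)]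
        else
          gaps ++ [PySem.List.pyGetD flock (r - 1) 0 - PySem.List.pyGetD flock r 0 + 1]) =
        (fun gaps r => gaps ++
          [if (r - 1) ∈ (pvMP flock 0 none).map Prod.fst then
            pvCeilHalf (PySem.List.pyGetD flock (r - 1) 0 - PySem.List.pyGetD flock r 0)
          else PySem.List.pyGetD flock (r - 1) 0 - PySem.List.pyGetD flock r 0 + 1]) := by
      funext gaps r; split <;> rfl
    rw [hfun, PySem.List.foldl_append_singleton_eq_map]
    congr 1
    apply pv_map_map_congr
    intro p hp
    have hiff := pv_mem_fst_iff _ h1 h2 p hp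
    by_cases hadj : p.2 = p.1 + 1
    · rw [if_pos (hiff.mpr (by omega))]
      simp only [pvC1, if_pos hadj]
      rw [show p.2 - 1 = p.1 from by omega]
    · rw [if_neg (fun hmem => hadj (by have := hiff.mp hmem; omega))]
      simp only [pvC1, if_neg hadj]
  have e2 : ∀ init : List Int,
      ((pvMP flock 0 none).map Prod.fst).foldl (fun gaps d =>
        let gaps := if decide (d - 1 ≥ 0) && (PySem.List.pyGetD flock (d - 1) 0 == PySem.List.pyGetD flock d 0)
          then gaps ++ [1] else gaps
        if (d + 1) ∈ (pvMP flock 0 none).map Prod.snd then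
          gaps ++ [pvCeilHalf (PySem.List.pyGetD flock d 0 - PySem.List.pyGetD flock (d + 1) 0)]
        else
          gaps ++ [PySem.List.pyGetD flock d 0 - PySem.List.pyGetD flock (d + 1) 0]) init =
      init ++ (pvMP flock 0 none).flatMap (pvC2 flock) := by
    intro init
    have hfun : (fun (gaps : List Int) (d : Int) =>
        let gaps := if decide (d - 1 ≥ 0) && (PySem.List.pyGetD flock (d - 1) 0 == PySem.List.pyGetD flock d 0)
          then gaps ++ [1] else gaps
        if (d + 1) ∈ (pvMP flock 0 none).map Prod.snd then
          gaps ++ [pvCeilHalf (PySem.List.pyGetD flock d 0 - PySem.List.pyGetD flock (d + 1) 0)]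
        else
          gaps ++ [PySem.List.pyGetD flock d 0 - PySem.List.pyGetD flock (d + 1) 0]) =
        (fun gaps d => gaps ++
          ((if decide (d - 1 ≥ 0) && (PySem.List.pyGetD flock (d - 1) 0 == PySem.List.pyGetD flock d 0)
            then [1] else []) ++
          [if (d + 1) ∈ (pvMP flock 0 none).map Prod.snd then
            pvCeilHalf (PySem.List.pyGetD flock d 0 - PySem.List.pyGetD flock (d + 1) 0)
          else PySem.List.pyGetD flock d 0 - PySem.List.pyGetD flock (d + 1) 0])) := by
      funext gaps d
      dsimp only
      split_ifs <;> simp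
    rw [hfun, PySem.List.foldl_append_eq_flatMap]
    congr 1
    apply pv_flatMap_map_congr
    intro p hp
    have hiff := pv_mem_snd_iff _ h1 h2 p hp
    simp only [pvC2]
    congr 1
    exact congrArg (fun z => [z]) (if_congr hiff rfl rfl)
  unfold num_rounds_to_skip
  rw [pvFDR_eq]
  dsimp only
  rw [e1 [], e2 ([] ++ (pvMP flock 0 none).map (pvC1 flock)), List.nil_append]

-- ===== VERDICT (by name: the statement is the Claim_ definition above) =====
theorem num_rounds_to_skip_spec : Claim_equal_num_rounds_to_skip := by
  intro flock _
  unfold Spec_num_rounds_to_skip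
  rw [pvA_eq, pvAlt_eq]
  apply pv_perm_min
  refine (pv_map_flatMap_perm _ _ _).trans (pv_flatMap_perm_congr _ _ _ ?_)
  intro p hp
  have hcond : decide (p.1 - 1 ≥ 0) = decide (p.1 ≥ 1) := decide_eq_decide.mpr (by omega)
  by_cases hadj : p.2 = p.1 + 1 <;>
    by_cases hone : (decide (p.1 ≥ 1) && (PySem.List.pyGetD flock (p.1 - 1) 0 == PySem.List.pyGetD flock p.1 0)) = true
  · simp only [pvC1, pvC2, pvCands, hadj, hcond, hone]
    simp [hadj]
    exact List.Perm.swap _ _ _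
  · simp only [pvC1, pvC2, pvCands, hadj, hcond, hone]
    simp [hadj, hone, hcond]
  · simp only [pvC1, pvC2, pvCands, hcond]
    simp [hadj, hone, hcond]
    exact List.Perm.swap _ _ _
  · simp only [pvC1, pvC2, pvCands, hcond]
    simp [hadj, hone, hcond]
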